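-- pv_equiv track=rewrite | github.com/vstbls/tira | tira I/fliptwo.py | solve
-- ===== SOURCE A (Python) =====
-- from collections import deque
--
-- def solve(n,k):
--     l = deque([i for i in range(1,n+1)])
--     for i in range(k):
--         l.append(l[1])
--         l.append(l[0])
--         l.popleft()
--         l.popleft()
--     return l[0]
-- ===== SOURCE B (Python) =====
-- def solve(n, k):
--     # Each step applies a fixed permutation of positions; the front after k
--     # steps is position sigma^k(0), whose orbit has a closed-form: length n
--     # when n is even, (n+1)//2 when n is odd.
--     if k <= 0:
--         return 1
--     if n % 2 == 1:
--         return 2 * (k % ((n + 1) // 2)) + 1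
--     r = k % n
--     pos = 2 * r if 2 * r <= n - 2 else 2 * r - n + 1
--     return pos + 1
-- ===== Notes on version B (the rewrite author's own statement) =====
-- stated objective: faster
-- what changed: A simulates k swap-and-rotate steps on a deque of n elements; B uses the closed form of the orbit of position 0 under the fixed index permutation one step applies (orbit length n for even n, (n+1)//2 for odd n) and computes the answer with one modulo.
import Mathlib
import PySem

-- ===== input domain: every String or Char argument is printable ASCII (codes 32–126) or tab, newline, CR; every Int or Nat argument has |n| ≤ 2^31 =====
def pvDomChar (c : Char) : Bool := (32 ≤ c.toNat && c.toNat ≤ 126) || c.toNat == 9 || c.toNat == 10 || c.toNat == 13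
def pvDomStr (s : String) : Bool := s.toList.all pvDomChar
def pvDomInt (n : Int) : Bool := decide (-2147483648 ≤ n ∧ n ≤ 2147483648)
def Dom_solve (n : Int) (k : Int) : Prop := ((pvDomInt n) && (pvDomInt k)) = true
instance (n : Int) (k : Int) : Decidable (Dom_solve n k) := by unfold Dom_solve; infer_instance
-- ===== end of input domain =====

-- B replaces A's O(n+k) deque simulation by the O(1) closed form of the orbit of
-- position 0 under the fixed index permutation one step applies.

-- ===== PORT A =====
-- one loop body: l.append(l[1]); l.append(l[0]); l.popleft(); l.popleft()
def stepA (l : List Int) : List Int :=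
  (((l ++ [PySem.List.pyGetD l 1 0]) ++ [PySem.List.pyGetD l 0 0]).tail).tail

def loopA : Nat → List Int → List Int
  | 0, l => l
  | t+1, l => loopA t (stepA l)

def solve (n : Int) (k : Int) : Int :=
  PySem.List.pyGetD (loopA k.toNat (PySem.List.pyRange 1 (n+1) 1)) 0 0

-- ===== PORT B =====
def solve_alt (n : Int) (k : Int) : Int :=
  if k ≤ 0 then 1
  else if PySem.Int.mod n 2 = 1 then
    2 * PySem.Int.mod k (PySem.Int.floordiv (n + 1) 2) + 1
  else
    (if 2 * PySem.Int.mod k n ≤ n - 2 then 2 * PySem.Int.mod k n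
     else 2 * PySem.Int.mod k n - n + 1) + 1

-- ===== PRECONDITION & SPEC =====
-- A raises IndexError when the deque has fewer than 2 elements during a loop
-- iteration (n ≤ 1 with k > 0) or is empty at the final l[0] (n ≤ 0).
def Pre_solve (n : Int) (k : Int) : Prop := 1 ≤ n ∧ (2 ≤ n ∨ k ≤ 0)
instance (n : Int) (k : Int) : Decidable (Pre_solve n k) := by unfold Pre_solve; infer_instance
def pvWitness_solve : Int × Int := (5, 3)

def Spec_solve (n : Int) (k : Int) (out : Int) : Prop := out = solve_alt n k
instance (n : Int) (k : Int) (out : Int) : Decidable (Spec_solve n k out) := by unfold Spec_solve; infer_instance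

-- ===== CLAIM (what is proved, stated in full; the proofs are below) =====
def Claim_equal_solve : Prop := ∀ (n : Int) (k : Int), Dom_solve n k → Pre_solve n k → Spec_solve n k (solve n k)

-- ===== LEMMAS AND PROOFS =====

-- the index permutation one step performs, on Nat positions (lists of length n)
def sig (n j : Nat) : Nat := if j = n - 1 then 0 else if j = n - 2 then 1 else j + 2

def iterSig (n : Nat) : Nat → Nat
  | 0 => 0
  | t+1 => sig n (iterSig n t)

-- closed-form position of the front after t steps (mirrors B's arithmetic)
def posF (n t : Nat) : Nat :=
  if n % 2 = 1 then 2 * (t % ((n + 1) / 2))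
  else if 2 * (t % n) ≤ n - 2 then 2 * (t % n) else 2 * (t % n) - n + 1

lemma stepA_eq (a b : Int) (rest : List Int) :
    stepA (a :: b :: rest) = rest ++ [b, a] := by
  simp [stepA, PySem.List.pyGetD]

lemma sig_lt {n j : Nat} (hn : 2 ≤ n) (hj : j < n) : sig n j < n := by
  unfold sig; split_ifs <;> omega

lemma iterSig_lt (n : Nat) (hn : 2 ≤ n) (t : Nat) : iterSig n t < n := by
  induction t with
  | zero => simp [iterSig]; omega
  | succ s ih => exact sig_lt hn ih

lemma stepA_getD (x y : Int) (rest : List Int) (j : Nat) (hj : j < rest.length + 2) :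
    PySem.List.pyGetD (stepA (x :: y :: rest)) (↑j) 0
      = PySem.List.pyGetD (x :: y :: rest) (↑(sig (rest.length + 2) j)) 0 := by
  rw [stepA_eq]
  simp only [PySem.List.pyGetD_natCast]
  rcases Nat.lt_trichotomy j rest.length with h | h | h
  · have hs : sig (rest.length + 2) j = j + 2 := by unfold sig; split_ifs <;> omega
    rw [hs]
    rw [List.getD_eq_getElem _ _ (by simp; omega), List.getD_eq_getElem _ _ (by simp; omega)]
    rw [List.getElem_append_left h]
    simp
  · have hs : sig (rest.length + 2) j = 1 := by unfold sig; split_ifs <;> omega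
    rw [hs, h]
    rw [List.getD_eq_getElem _ _ (by simp), List.getD_eq_getElem _ _ (by simp)]
    rw [List.getElem_append_right (by omega)]
    simp
  · have hj' : j = rest.length + 1 := by omega
    have hs : sig (rest.length + 2) j = 0 := by unfold sig; split_ifs <;> omega
    rw [hs, hj']
    rw [List.getD_eq_getElem _ _ (by simp), List.getD_eq_getElem _ _ (by simp)]
    rw [List.getElem_append_right (by omega)]
    simp

lemma stepA_length (x y : Int) (rest : List Int) :
    (stepA (x :: y :: rest)).length = (x :: y :: rest).length := by
  rw [stepA_eq]; simp

lemma loopA_front (n : Nat) (hn : 2 ≤ n) :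
    ∀ (t : Nat) (l : List Int), l.length = n →
      PySem.List.pyGetD (loopA t l) 0 0 = PySem.List.pyGetD l (↑(iterSig n t)) 0 := by
  intro t
  induction t with
  | zero => intro l hl; simp [loopA, iterSig]
  | succ t ih =>
    intro l hl
    rcases l with _ | ⟨x, l2⟩
    · simp at hl; omega
    rcases l2 with _ | ⟨y, rest⟩
    · simp at hl; omega
    show PySem.List.pyGetD (loopA t (stepA (x :: y :: rest))) 0 0 = _
    rw [ih (stepA (x :: y :: rest)) (by rw [stepA_length]; exact hl)]
    have hlen : rest.length + 2 = n := by simpa using hl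
    have hlt : iterSig n t < rest.length + 2 := by
      have := iterSig_lt n hn t; omega
    rw [stepA_getD x y rest (iterSig n t) hlt, hlen]
    rfl

lemma mod_succ_lt {t c : Nat} (hc : 2 ≤ c) (h : t % c + 1 < c) :
    (t + 1) % c = t % c + 1 := by
  rw [Nat.add_mod, Nat.mod_eq_of_lt (show 1 < c by omega), Nat.mod_eq_of_lt h]

lemma mod_succ_eq {t c : Nat} (hc : 2 ≤ c) (h : t % c + 1 = c) :
    (t + 1) % c = 0 := by
  rw [Nat.add_mod, Nat.mod_eq_of_lt (show 1 < c by omega), h, Nat.mod_self]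

lemma posF_odd {n : Nat} (t : Nat) (hpar : n % 2 = 1) :
    posF n t = 2 * (t % ((n + 1) / 2)) := by
  simp [posF, hpar]

lemma posF_even {n : Nat} (t : Nat) (hpar : n % 2 = 0) :
    posF n t = if 2 * (t % n) ≤ n - 2 then 2 * (t % n) else 2 * (t % n) - n + 1 := by
  simp [posF, hpar]

lemma iterSig_eq_posF (n : Nat) (hn : 2 ≤ n) (t : Nat) : iterSig n t = posF n t := by
  induction t with
  | zero =>
    rcases Nat.mod_two_eq_zero_or_one n with h | h <;> simp [iterSig, posF, h]
  | succ t ih =>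
    show sig n (iterSig n t) = posF n (t + 1)
    rw [ih]
    rcases Nat.mod_two_eq_zero_or_one n with hpar | hpar
    · -- n even: residues mod n
      have hr : t % n < n := Nat.mod_lt _ (by omega)
      rcases Nat.lt_or_ge (t % n + 1) n with hlt | hge
      · have hc := mod_succ_lt hn hlt
        simp only [posF_even t hpar, posF_even (t + 1) hpar, sig]
        split_ifs <;> omega
      · have heq : t % n + 1 = n := by omega
        have hc := mod_succ_eq hn heq
        simp only [posF_even t hpar, posF_even (t + 1) hpar, sig]
        split_ifs <;> omega
    · -- n odd: residues mod (n+1)/2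
      have hc2 : 2 ≤ (n + 1) / 2 := by omega
      have hr : t % ((n + 1) / 2) < (n + 1) / 2 := Nat.mod_lt _ (by omega)
      rcases Nat.lt_or_ge (t % ((n + 1) / 2) + 1) ((n + 1) / 2) with hlt | hge
      · have hc := mod_succ_lt hc2 hlt
        simp only [posF_odd t hpar, posF_odd (t + 1) hpar, sig]
        split_ifs <;> omega
      · have heq : t % ((n + 1) / 2) + 1 = (n + 1) / 2 := by omega
        have hc := mod_succ_eq hc2 heq
        simp only [posF_odd t hpar, posF_odd (t + 1) hpar, sig]
        split_ifs <;> omega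

lemma solve_closed (n k : Int) (hn : 2 ≤ n) :
    solve n k = 1 + (iterSig n.toNat k.toNat : Int) := by
  unfold solve
  have hlen : (PySem.List.pyRange 1 (n + 1) 1).length = n.toNat := by
    rw [PySem.List.length_pyRange_one]; omega
  rw [loopA_front n.toNat (by omega) k.toNat _ hlen]
  have hlt : iterSig n.toNat k.toNat < n.toNat := iterSig_lt n.toNat (by omega) _
  rw [PySem.List.pyGetD_natCast]
  rw [List.getD_eq_getElem _ _ (by omega)]
  rw [PySem.List.getElem_pyRange_one]

theorem solve_eq_alt (n k : Int) (hpre : Pre_solve n k) : solve n k = solve_alt n k := by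
  obtain ⟨h1, h2⟩ := hpre
  by_cases hk : k ≤ 0
  · -- zero loop iterations; the front of [1..n] is 1
    have hkn : k.toNat = 0 := by omega
    unfold solve solve_alt
    rw [hkn, if_pos hk]
    show PySem.List.pyGetD (PySem.List.pyRange 1 (n + 1) 1) 0 0 = 1
    rw [PySem.List.pyRange_one_cons (by omega)]
    exact PySem.List.pyGetD_zero_cons 1 _ 0
  · have hn : 2 ≤ n := by omega
    set N := n.toNat with hNdef
    set K := k.toNat with hKdef
    have hnc : n = (N : Int) := by omega
    have hkc : k = (K : Int) := by omega
    rw [solve_closed n k hn, iterSig_eq_posF N (by omega) K]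
    unfold solve_alt
    rw [if_neg hk]
    have hmod2 : PySem.Int.mod n 2 = ((N % 2 : Nat) : Int) := by
      rw [hnc]; exact_mod_cast PySem.Int.mod_natCast N 2
    rw [hmod2]
    by_cases hpar : N % 2 = 1
    · rw [if_pos (by rw [hpar]; norm_num)]
      have hfd : PySem.Int.floordiv (n + 1) 2 = (((N + 1) / 2 : Nat) : Int) := by
        rw [hnc]; exact_mod_cast PySem.Int.floordiv_natCast (N + 1) 2
      rw [hfd, hkc, PySem.Int.mod_natCast K ((N + 1) / 2)]
      rw [posF_odd K hpar]
      push_cast; ring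
    · rw [if_neg (by rw [show N % 2 = 0 by omega]; norm_num)]
      have hm : PySem.Int.mod k n = ((K % N : Nat) : Int) := by
        rw [hnc, hkc]; exact PySem.Int.mod_natCast K N
      rw [hm, hnc]
      have hpar0 : N % 2 = 0 := by omega
      have hr : K % N < N := Nat.mod_lt _ (by omega)
      rw [posF_even K hpar0]
      split_ifs <;> push_cast <;> omega

-- ===== VERDICT (by name: the statement is the Claim_ definition above) =====
theorem solve_spec : Claim_equal_solve := by
  intro n k _ hpre
  exact solve_eq_alt n k hpre
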